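-- pv_equiv track=rewrite | github.com/miko73/codity | EquiLeader.py | solution
-- ===== SOURCE A (Python) =====
-- def leader(a):
--     n = len(a)
--     if (n == 0):
--         return None
--     if (n == 1):
--         return a[0]
--     if (n == 2 and a[0] == a[1]):
--         return a[0]
--
--     d = sorted(a)[n // 2]
--     dn = 0
--     for e in a:
--         if e == d:
--             dn += 1
--     if dn > n // 2:
--         return d
--     else:
--         return None
--
-- def solution(a):
--     n = len(a)
--     l = leader(a)
--
--     if None == l:
--         return 0
--     if 1 == n:
--         return 0
--     if 2 == n:
--         return 1
--
--     cnt = 0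
--
--     dl, dr = {}, {}
--     for i in range(n):  # init dr
--         if a[i] not in dr:
--             dr[a[i]] = 1
--         else:
--             dr[a[i]] += 1
--     ld = a[0]  # leader
--
--     for i in range(n):
--         if a[i] not in dl:
--             dl[a[i]] = 1
--         else:
--             dl[a[i]] += 1
--
--         dr[a[i]] -= 1
--
--         if dl[ld] < dl[a[i]]:
--             ld = a[i]  # new leader from dl
--
--         if (i + 1) // 2 < dl[ld] and (n - (i + 1)) // 2 < dr[ld]:
--             cnt += 1
--     return cnt
-- ===== SOURCE B (Python) =====
-- def solution(a):
--     n = len(a)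
--     # Boyer-Moore majority vote: O(n) candidate, then verify by counting
--     cand = None
--     bal = 0
--     for e in a:
--         if bal == 0:
--             cand = e
--             bal = 1
--         elif e == cand:
--             bal += 1
--         else:
--             bal -= 1
--     if cand is None:
--         return 0
--     total = 0
--     for e in a:
--         if e == cand:
--             total += 1
--     if 2 * total <= n:
--         return 0
--     cnt = 0
--     left = 0
--     i = 0
--     for e in a:
--         if e == cand:
--             left += 1
--         i += 1
--         if 2 * left > i and 2 * (total - left) > n - i:
--             cnt += 1
--     return cnt
-- ===== Notes on version B (the rewrite author's own statement) =====
-- stated objective: faster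
-- what changed: B finds the leader with a Boyer-Moore majority vote plus one verification count (O(n), no sorting) and counts EquiLeaders with a single integer prefix-counter pass, instead of A's sort-based median leader and dictionary-per-element prefix/suffix counting.
import Mathlib
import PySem

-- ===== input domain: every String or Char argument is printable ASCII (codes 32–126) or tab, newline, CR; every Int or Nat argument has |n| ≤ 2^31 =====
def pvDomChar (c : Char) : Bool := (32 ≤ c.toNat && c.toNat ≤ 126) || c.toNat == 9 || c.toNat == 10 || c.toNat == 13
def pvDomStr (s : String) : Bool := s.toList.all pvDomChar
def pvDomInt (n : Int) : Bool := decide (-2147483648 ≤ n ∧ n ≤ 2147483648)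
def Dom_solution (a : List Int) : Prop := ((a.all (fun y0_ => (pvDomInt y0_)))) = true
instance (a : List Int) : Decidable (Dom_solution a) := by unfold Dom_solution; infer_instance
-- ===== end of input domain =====

-- B replaces A's sort-based leader search and per-element dictionary bookkeeping by a
-- Boyer-Moore majority vote plus one verified prefix-counter pass (objective: faster).

-- ===== PORT A =====
-- helper `leader` of A: returns the leader of a, or none
def pyLeader (a : List Int) : Option Int :=
  let n : Int := a.length
  if n = 0 then none
  else if n = 1 then PySem.List.pyGet? a 0
  else if n = 2 ∧ PySem.List.pyGet? a 0 = PySem.List.pyGet? a 1 then PySem.List.pyGet? a 0   -- Option equality = value equality (both indices in range)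
  else
    match PySem.List.pyGet? (PySem.List.sorted a (fun x => x) false) (PySem.Int.floordiv n 2) with
    | none => none     -- unreachable: 0 ≤ n//2 < n here
    | some d =>
      let dn : Int := a.foldl (fun dn e => if e = d then dn + 1 else dn) 0
      if dn > PySem.Int.floordiv n 2 then some d else none

-- one iteration of A's main loop (state: cnt, dl, dr, ld; argument: (i, a[i]))
-- dl[ld], dl[a[i]], dr[ld] read with default 0: the keys are always present on reachable states
def stepA (n : Int) (s : Int × PySem.Dict Int Int × PySem.Dict Int Int × Int)
    (p : Int × Int) : Int × PySem.Dict Int Int × PySem.Dict Int Int × Int :=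
  let (cnt, dl, dr, ld) := s
  let (i, e) := p
  let dl := if dl.contains e = false then dl.insert e 1 else dl.modify e 0 (· + 1)
  let dr := dr.modify e 0 (· - 1)     -- dr[a[i]] -= 1 (key always present)
  let ld := if dl.getD ld 0 < dl.getD e 0 then e else ld
  let cnt := if PySem.Int.floordiv (i + 1) 2 < dl.getD ld 0 ∧
                PySem.Int.floordiv (n - (i + 1)) 2 < dr.getD ld 0 then cnt + 1 else cnt
  (cnt, dl, dr, ld)

def solution (a : List Int) : Int :=
  let n : Int := a.length
  match pyLeader a with
  | none => 0
  | some _ =>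
    if n = 1 then 0
    else if n = 2 then 1
    else
      -- init dr: dr[a[i]] = multiplicity of a[i]  (for i in range(n))
      let dr := a.foldl
        (fun d e => if d.contains e = false then d.insert e 1 else d.modify e 0 (· + 1))
        PySem.Dict.empty
      match a with
      | [] => 0        -- unreachable: a leader exists, so a ≠ []
      | e0 :: _ =>     -- ld = a[0]
        ((PySem.List.enumerate a 0).foldl (stepA n) (0, PySem.Dict.empty, dr, e0)).1

-- ===== PORT B =====
-- one Boyer-Moore vote step (state: candidate, balance)
def bmStep (s : Option Int × Int) (e : Int) : Option Int × Int :=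
  let (c, b) := s
  if b = 0 then (some e, 1)
  else if some e = c then (c, b + 1)
  else (c, b - 1)

-- one step of B's counting pass (state: cnt, left, i)
def bStep (c n total : Int) (s : Int × Int × Int) (e : Int) : Int × Int × Int :=
  let (cnt, left, i) := s
  let left := if e = c then left + 1 else left
  let i := i + 1
  let cnt := if 2 * left > i ∧ 2 * (total - left) > n - i then cnt + 1 else cnt
  (cnt, left, i)

def solution_alt (a : List Int) : Int :=
  let n : Int := a.length
  let cb := a.foldl bmStep (none, 0)
  match cb.1 with
  | none => 0
  | some c =>
    let total : Int := a.foldl (fun t e => if e = c then t + 1 else t) 0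
    if 2 * total ≤ n then 0
    else ((a.foldl (bStep c n total) (0, 0, 0)).1 : Int)

-- ===== PRECONDITION & SPEC =====
def Spec_solution (a : List Int) (out : Int) : Prop := out = solution_alt a
instance (a : List Int) (out : Int) : Decidable (Spec_solution a out) := by unfold Spec_solution; infer_instance

-- ===== CLAIM (what is proved, stated in full; the proofs are below) =====
def Claim_equal_solution : Prop := ∀ (a : List Int), Dom_solution a → Spec_solution a (solution a)

-- ===== LEMMAS AND PROOFS =====

-- m is a strict majority element of a
def IsMaj (a : List Int) (m : Int) : Prop := a.length < 2 * a.count m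

-- two distinct values cannot both fill more than half a list
lemma count_pair_le (l : List Int) (x y : Int) (h : x ≠ y) :
    l.count x + l.count y ≤ l.length := by
  induction l with
  | nil => simp
  | cons e t ih =>
    simp only [List.count_cons, List.length_cons]
    by_cases hx : x = e
    · have hy : ¬ y = e := fun hy => h (hx.trans hy.symm)
      simp [hx, Ne.symm hy, hy]
      rw [hx] at ih
      omega
    · by_cases hy : y = e
      · simp [Ne.symm hx, hx, hy]
        rw [hy] at ih
        omega
      · simp [hx, hy, Ne.symm hx, Ne.symm hy]
        omega

lemma maj_unique {a : List Int} {x y : Int} (hx : IsMaj a x) (hy : IsMaj a y) : x = y := by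
  by_contra hne
  have := count_pair_le a x y hne
  unfold IsMaj at hx hy; omega

-- the common Counter-building pattern of A: pointwise value
lemma getD_upd (d : PySem.Dict Int Int) (e x : Int) :
    (if d.contains e = false then d.insert e 1 else d.modify e 0 (· + 1)).getD x 0
      = d.getD x 0 + (if x = e then 1 else 0) := by
  by_cases hc : d.contains e
  · simp [hc, PySem.Dict.getD_modify]
    split_ifs with h
    · subst h; ring
    · omega
  · have h0 : d.getD e 0 = 0 := PySem.Dict.getD_of_not_contains d 0 (by simpa using hc)
    simp [hc, PySem.Dict.getD_insert]
    split_ifs with h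
    · subst h; omega
    · omega

lemma getD_buildLoop (l : List Int) (d : PySem.Dict Int Int) (x : Int) :
    (l.foldl (fun d e => if d.contains e = false then d.insert e 1 else d.modify e 0 (· + 1)) d).getD x 0
      = d.getD x 0 + l.count x := by
  induction l generalizing d with
  | nil => simp
  | cons e t ih =>
    simp only [List.foldl_cons, List.count_cons, ih, getD_upd]
    by_cases h : x = e <;> simp [h] <;> push_cast <;> omega

-- ---- Boyer-Moore correctness ----
def pot (s : Option Int × Int) (x : Int) : Int := if s.1 = some x then s.2 else -s.2

lemma bm_step_inv (s : Option Int × Int) (hb : 0 ≤ s.2) (e x : Int) :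
    0 ≤ (bmStep s e).2 ∧ pot s x + (if e = x then 2 else 0) - 1 ≤ pot (bmStep s e) x := by
  obtain ⟨c, b⟩ := s
  simp only [bmStep, pot] at *
  rcases c with _ | v <;> split_ifs <;> simp_all <;> omega

lemma bm_inv (l : List Int) (s : Option Int × Int) (hb : 0 ≤ s.2) (x : Int) :
    0 ≤ (l.foldl bmStep s).2 ∧
      pot s x + 2 * l.count x - l.length ≤ pot (l.foldl bmStep s) x := by
  induction l generalizing s with
  | nil => simpa using hb
  | cons e t ih =>
    obtain ⟨h1, h2⟩ := bm_step_inv s hb e x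
    obtain ⟨h3, h4⟩ := ih (bmStep s e) h1
    simp only [List.foldl_cons, List.count_cons, List.length_cons]
    refine ⟨h3, ?_⟩
    by_cases hxe : x = e
    · subst hxe
      rw [if_pos rfl] at h2
      simp only [beq_self_eq_true, if_true]
      push_cast
      omega
    · rw [if_neg (fun hh => hxe hh.symm)] at h2
      have hb1 : (x == e) = false := beq_eq_false_iff_ne.mpr hxe
      have hb2 : (e == x) = false := beq_eq_false_iff_ne.mpr (Ne.symm hxe)
      simp only [hb1, hb2, if_false]
      push_cast
      omega

lemma bm_maj {a : List Int} {m : Int} (hm : IsMaj a m) :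
    (a.foldl bmStep (none, 0)).1 = some m := by
  obtain ⟨h1, h2⟩ := bm_inv a (none, 0) le_rfl m
  unfold IsMaj at hm
  have hpot : 0 < pot (a.foldl bmStep (none, 0)) m := by
    simp only [pot] at h2 ⊢; simp at h2; omega
  by_contra hne
  unfold pot at hpot
  rw [if_neg hne] at hpot
  omega

-- ---- sorted-median lemma ----
lemma sorted_mid (a : List Int) (m : Int) (hm : IsMaj a m)
    (hk : a.length / 2 < (PySem.List.sorted a (fun x => x) false).length) :
    (PySem.List.sorted a (fun x => x) false)[a.length / 2] = m := by
  set s := PySem.List.sorted a (fun x => x) false with hs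
  have hlen : s.length = a.length := PySem.List.length_sorted a _ false
  have hcount : s.count m = a.count m := ((PySem.List.sorted_perm a _ false).count_eq m)
  set k := a.length / 2 with hkdef
  rcases lt_trichotomy s[k] m with hlt | heq | hgt
  · exfalso
    have htake : (s.take (k + 1)).count m = 0 := by
      rw [List.count_eq_zero]
      intro hmem
      obtain ⟨j, hj, hje⟩ := List.getElem_of_mem hmem
      rw [List.getElem_take] at hje
      have hjk : j ≤ k := by have := hj; simp [List.length_take] at this; omega
      have : s[j] ≤ s[k] := PySem.List.sorted_id_getElem_mono a hjk hk
      omega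
    have hsplit : s.count m = (s.take (k+1)).count m + (s.drop (k+1)).count m := by
      conv_lhs => rw [← List.take_append_drop (k+1) s]
      rw [List.count_append]
    have hd : (s.drop (k+1)).count m ≤ s.length - (k+1) := by
      simpa [List.length_drop] using List.count_le_length (l := s.drop (k+1)) (a := m)
    unfold IsMaj at hm; omega
  · exact heq
  · exfalso
    have hdrop : (s.drop k).count m = 0 := by
      rw [List.count_eq_zero]
      intro hmem
      obtain ⟨j, hj, hje⟩ := List.getElem_of_mem hmem
      rw [List.length_drop] at hj
      rw [List.getElem_drop] at hje
      have hb2 : k + j < s.length := by omega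
      have hle : s[k] ≤ s[k + j] := PySem.List.sorted_id_getElem_mono a (Nat.le_add_right k j) hb2
      omega
    have hsplit : s.count m = (s.take k).count m + (s.drop k).count m := by
      conv_lhs => rw [← List.take_append_drop k s]
      rw [List.count_append]
    have ht : (s.take k).count m ≤ k := by
      have := List.count_le_length (l := s.take k) (a := m)
      simp [List.length_take] at this; omega
    unfold IsMaj at hm; omega


lemma count_singleton_ite (e x : Int) : ([e].count x) = if x = e then 1 else 0 := by
  by_cases h : x = e <;> simp [h, Ne.symm, eq_comm]

lemma count_cons_ne {e x : Int} (s : List Int) (h : x ≠ e) : (e :: s).count x = s.count x := by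
  simp [List.count_cons, h, Ne.symm h, eq_comm]

lemma count_foldl (a : List Int) (c : Int) :
    a.foldl (fun t e => if e = c then t + 1 else t) (0 : Int) = (a.count c : Int) := by
  rw [show (fun (t : Int) e => if e = c then t + 1 else t)
        = (fun acc x => if ((x == c) = true) then acc + 1 else acc) from by
      funext t e; by_cases h : e = c <;> simp [h]]
  rw [PySem.List.foldl_count_if (· == c) a 0]
  simp [List.count]

-- the running maximum stays a maximum after appending one element
lemma runmax_step (p : List Int) (e ld : Int) (hld : ∀ z ∈ p, p.count z ≤ p.count ld) :
    ∀ x ∈ p ++ [e],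
      (p ++ [e]).count x ≤
        (p ++ [e]).count (if (p ++ [e]).count ld < (p ++ [e]).count e then e else ld) := by
  intro x hx
  have hxe := List.mem_append.mp hx
  have hcx : (p ++ [e]).count x = p.count x + ([e].count x) := List.count_append ..
  have hcl : (p ++ [e]).count ld = p.count ld + ([e].count ld) := List.count_append ..
  have hcee : (p ++ [e]).count e = p.count e + 1 := by
    rw [List.count_append, count_singleton_ite]; simp
  split_ifs with hbr
  · rcases hxe with hxp | hxe
    · by_cases hxeq : x = e
      · subst hxeq; exact le_rfl
      · have h1 := hld x hxp
        rw [hcx, count_singleton_ite, if_neg hxeq, hcee]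
        omega
    · simp at hxe; subst hxe; exact le_rfl
  · rcases hxe with hxp | hxe
    · by_cases hxeq : x = e
      · subst hxeq; omega
      · have h1 := hld x hxp
        rw [hcx, count_singleton_ite, if_neg hxeq]
        omega
    · simp at hxe; subst hxe; omega

-- ---- leader correctness ----
lemma maj_singleton (x m : Int) (hm : IsMaj [x] m) : m = x := by
  by_contra h
  have : [x].count m = 0 := by simp [count_singleton_ite, h]
  unfold IsMaj at hm; omega

lemma maj_pair {x y m : Int} (hm : IsMaj [x, y] m) : m = x ∧ m = y := by
  unfold IsMaj at hm
  constructor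
  · by_contra h
    have h1 : [x, y].count m = [y].count m := count_cons_ne [y] h
    have h2 := List.count_le_length (a := m) (l := [y])
    simp at h2
    simp [h1] at hm
    omega
  · by_contra h
    have h1 : [y].count m = 0 := by simp [count_singleton_ite, h]
    have h2 : [x, y].count m ≤ 1 := by
      simp [List.count_cons, h1]
      split <;> omega
    have hlen : [x, y].length = 2 := rfl
    omega

lemma leader_of_maj {a : List Int} {m : Int} (hm : IsMaj a m) : pyLeader a = some m := by
  rcases a with _ | ⟨x, _ | ⟨y, _ | ⟨z, t⟩⟩⟩
  · exfalso; unfold IsMaj at hm; simp at hm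
  · have hmx := maj_singleton x m hm
    subst hmx
    simp [pyLeader, PySem.List.pyGet?_zero_cons]
  · obtain ⟨h1, h2⟩ := maj_pair hm
    subst h1
    rw [← h2]
    simp [pyLeader, pysem]
  · -- length ≥ 3
    set l := x :: y :: z :: t with hl
    have hn3 : 3 ≤ l.length := by simp [hl]
    simp only [pyLeader]
    rw [if_neg (by push_cast; omega), if_neg (by push_cast; omega),
        if_neg (by rintro ⟨h, -⟩; push_cast at h; omega)]
    have hfl : PySem.Int.floordiv ((l.length : Int)) 2 = ((l.length / 2 : Nat) : Int) := by
      exact_mod_cast PySem.Int.floordiv_natCast l.length 2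
    rw [hfl, PySem.List.pyGet?_natCast]
    have hk : l.length / 2 < (PySem.List.sorted l (fun x => x) false).length := by
      rw [PySem.List.length_sorted]; omega
    rw [List.getElem?_eq_getElem hk, sorted_mid l m hm hk]
    simp only [count_foldl]
    rw [if_pos (by unfold IsMaj at hm; push_cast; omega)]

lemma leader_none {a : List Int} (hnm : ∀ m, ¬ IsMaj a m) : pyLeader a = none := by
  rcases a with _ | ⟨x, _ | ⟨y, r⟩⟩
  · simp [pyLeader]
  · exfalso
    exact hnm x (by unfold IsMaj; simp)
  · set l := x :: y :: r with hl
    have hn2 : 2 ≤ l.length := by simp [hl]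
    simp only [pyLeader]
    rw [if_neg (by push_cast; omega), if_neg (by push_cast; omega)]
    by_cases h2 : ((l.length : Int) = 2 ∧ PySem.List.pyGet? l 0 = PySem.List.pyGet? l 1)
    · exfalso
      obtain ⟨h2a, h2b⟩ := h2
      have hr : r = [] := by
        have : l.length = 2 := by exact_mod_cast h2a
        simp [hl] at this
        exact this
      subst hr
      have hxy : x = y := by
        simp [hl, pysem] at h2b
        exact h2b
      subst hxy
      exact hnm x (by
        unfold IsMaj
        rw [hl]
        have hc : ([x, x].count x) = 2 := by simp
        have hlen : ([x, x] : List Int).length = 2 := rfl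
        omega)
    · rw [if_neg h2]
      cases hget : PySem.List.pyGet? (PySem.List.sorted l (fun x => x) false)
          (PySem.Int.floordiv ((l.length : Int)) 2) with
      | none => rfl
      | some d =>
        simp only [count_foldl]
        have hnd := hnm d
        unfold IsMaj at hnd
        have hfl : PySem.Int.floordiv ((l.length : Int)) 2 = ((l.length / 2 : Nat) : Int) := by
          exact_mod_cast PySem.Int.floordiv_natCast l.length 2
        rw [if_neg (by rw [hfl]; push_cast; omega)]

-- ---- main-loop equivalence ----
lemma loop_eq (a : List Int) (L n total : Int)
    (hn : n = a.length) (htot : total = (a.count L : Int)) (hmaj : IsMaj a L) :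
    ∀ (s p : List Int), a = p ++ s →
    ∀ (cnt : Int) (dl dr : PySem.Dict Int Int) (ld left : Int),
      (∀ x, dl.getD x 0 = (p.count x : Int)) →
      (∀ x, dr.getD x 0 = (s.count x : Int)) →
      (∀ x ∈ p, dl.getD x 0 ≤ dl.getD ld 0) →
      left = (p.count L : Int) →
      ((PySem.List.enumerate s (p.length : Int)).foldl (stepA n) (cnt, dl, dr, ld)).1
        = (s.foldl (bStep L n total) (cnt, left, (p.length : Int))).1 := by
  intro s
  induction s with
  | nil =>
    intro p hps cnt dl dr ld left hdl hdr hld hleft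
    simp [PySem.List.enumerate_nil]
  | cons e s ih =>
    intro p hps cnt dl dr ld left hdl hdr hld hleft
    rw [PySem.List.enumerate_cons, List.foldl_cons, List.foldl_cons]
    -- the new states after one step
    set dl1 := (if dl.contains e = false then dl.insert e 1 else dl.modify e 0 (· + 1)) with hdl1e
    set dr1 := dr.modify e 0 (· - 1) with hdr1e
    set ld1 := (if dl1.getD ld 0 < dl1.getD e 0 then e else ld) with hld1e
    set left1 := (if e = L then left + 1 else left) with hleft1e
    set condA := (PySem.Int.floordiv ((p.length : Int) + 1) 2 < dl1.getD ld1 0 ∧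
        PySem.Int.floordiv (n - ((p.length : Int) + 1)) 2 < dr1.getD ld1 0) with hcondAe
    set condB := (2 * left1 > (p.length : Int) + 1 ∧
        2 * (total - left1) > n - ((p.length : Int) + 1)) with hcondBe
    have hstepA : stepA n (cnt, dl, dr, ld) ((p.length : Int), e)
        = ((if condA then cnt + 1 else cnt), dl1, dr1, ld1) := rfl
    have hstepB : bStep L n total (cnt, left, (p.length : Int)) e
        = ((if condB then cnt + 1 else cnt), left1, (p.length : Int) + 1) := rfl
    -- basic shape facts
    have hpe : a = (p ++ [e]) ++ s := by rw [hps]; simp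
    have hlenpe0 : ((p ++ [e]).length) = p.length + 1 := by simp
    have hlen1 : (((p ++ [e]).length : Nat) : Int) = (p.length : Int) + 1 := by
      rw [hlenpe0]; push_cast; ring
    have hce : ∀ x : Int, ([e].count x) = if x = e then 1 else 0 := fun x => count_singleton_ite e x
    -- invariants for the extended prefix
    have hdl1 : ∀ x, dl1.getD x 0 = (((p ++ [e]).count x : Nat) : Int) := by
      intro x
      rw [hdl1e, getD_upd dl e x, hdl x, List.count_append, hce x]
      by_cases h : x = e <;> simp [h]
    have hdr1 : ∀ x, dr1.getD x 0 = ((s.count x : Nat) : Int) := by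
      intro x
      rw [hdr1e, PySem.Dict.getD_modify]
      by_cases h : x = e
      · subst h
        rw [if_pos rfl, hdr x]
        have : ((x :: s).count x) = s.count x + 1 := by simp
        rw [this]; push_cast; ring
      · rw [if_neg h, hdr x, count_cons_ne s h]
    have hld1 : ∀ x ∈ p ++ [e], dl1.getD x 0 ≤ dl1.getD ld1 0 := by
      intro x hx
      have hldc : ∀ z ∈ p, p.count z ≤ p.count ld := by
        intro z hz
        have := hld z hz
        rw [hdl z, hdl ld] at this
        exact_mod_cast this
      have hrm := runmax_step p e ld hldc x hx
      have hbr : (dl1.getD ld 0 < dl1.getD e 0) ↔ ((p ++ [e]).count ld < (p ++ [e]).count e) := by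
        rw [hdl1 ld, hdl1 e]
        exact_mod_cast Iff.rfl
      rw [hdl1 x, hdl1 ld1, hld1e]
      by_cases hb : dl1.getD ld 0 < dl1.getD e 0
      · rw [if_pos hb]
        rw [if_pos (hbr.mp hb)] at hrm
        exact_mod_cast hrm
      · rw [if_neg hb]
        rw [if_neg (fun hc => hb (hbr.mpr hc))] at hrm
        exact_mod_cast hrm
    have hleft1 : left1 = (((p ++ [e]).count L : Nat) : Int) := by
      rw [hleft1e, hleft, List.count_append, hce L]
      by_cases h : e = L
      · rw [if_pos h, if_pos h.symm]; push_cast; ring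
      · rw [if_neg h, if_neg (fun hh => h hh.symm)]; push_cast; ring
    -- arithmetic facts
    have hfd : ∀ q : Int, PySem.Int.floordiv q 2 = q / 2 :=
      fun q => PySem.Int.floordiv_eq_ediv_of_pos (by norm_num)
    have hns : n - ((p.length : Int) + 1) = (s.length : Int) := by
      rw [hn, hps]; push_cast [List.length_append, List.length_cons]; ring
    have hsplit : ∀ z : Int, a.count z = (p ++ [e]).count z + s.count z := by
      intro z
      rw [hpe, List.count_append]
    have hlenpe : ((p ++ [e]).length) = p.length + 1 := by simp
    -- the two step conditions are equivalent
    have hiff : condA ↔ condB := by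
      rw [hcondAe, hcondBe]
      constructor
      · rintro ⟨h1, h2⟩
        rw [hdl1 ld1, hfd] at h1
        rw [hdr1 ld1, hfd, hns] at h2
        have hm1 : IsMaj a ld1 := by
          unfold IsMaj
          have hsp := hsplit ld1
          have hlena : a.length = p.length + 1 + s.length := by rw [hps]; simp; omega
          omega
        have hl1L : ld1 = L := maj_unique hm1 hmaj
        rw [hl1L] at h1 h2
        refine ⟨?_, ?_⟩
        · rw [hleft1]; omega
        · rw [hleft1, htot, hns]
          have hsp := hsplit L
          push_cast
          omega
      · rintro ⟨h1, h2⟩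
        rw [hleft1] at h1 h2
        rw [htot, hns] at h2
        have hLmem : L ∈ p ++ [e] := List.count_pos_iff.mp (by omega)
        have hl1L : ld1 = L := by
          by_contra hne
          have hub := count_pair_le (p ++ [e]) ld1 L hne
          have hml := hld1 L hLmem
          rw [hdl1 L, hdl1 ld1] at hml
          have hlpe := hlenpe
          omega
        rw [hl1L, hdl1 L, hdr1 L, hfd, hfd, hns]
        have hsp := hsplit L
        refine ⟨by omega, by push_cast at h2 ⊢; omega⟩
    rw [hstepA, hstepB, if_congr hiff rfl rfl]
    have := ih (p ++ [e]) hpe (if condB then cnt + 1 else cnt) dl1 dr1 ld1 left1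
      hdl1 hdr1 hld1 hleft1
    rw [hlen1] at this
    exact this

lemma maj_two {x y m : Int} (hm : IsMaj [x, y] m) : x = m ∧ y = m := by
  obtain ⟨h1, h2⟩ := maj_pair hm
  exact ⟨h1.symm, h2.symm⟩

-- ===== VERDICT (by name: the statement is the Claim_ definition above) =====
theorem solution_spec : Claim_equal_solution := by
  unfold Claim_equal_solution
  intro a _
  unfold Spec_solution
  by_cases hex : ∃ m, IsMaj a m
  · obtain ⟨L, hL⟩ := hex
    have hlead := leader_of_maj hL
    have hbm := bm_maj hL
    rcases a with _ | ⟨x, _ | ⟨y, _ | ⟨z, t⟩⟩⟩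
    · exfalso; unfold IsMaj at hL; simp at hL
    · have hx := maj_singleton x L hL
      subst hx
      simp only [solution, solution_alt, hlead, hbm, count_foldl]
      norm_num [bStep]
    · obtain ⟨h1, h2⟩ := maj_two hL
      subst h1; subst h2
      simp only [solution, solution_alt, hlead, hbm, count_foldl]
      norm_num [bStep]
    · -- length ≥ 3
      have hn1 : ¬ (((x :: y :: z :: t).length : Int) = 1) := by push_cast; simp; omega
      have hn2 : ¬ (((x :: y :: z :: t).length : Int) = 2) := by push_cast; simp; omega
      have hmajI : ((x :: y :: z :: t).length : Int) < 2 * ((x :: y :: z :: t).count L : Int) := by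
        unfold IsMaj at hL; push_cast; omega
      simp only [solution, solution_alt, hlead, hbm, count_foldl]
      rw [if_neg hn1, if_neg hn2, if_neg (by omega)]
      have hdr : ∀ w : Int,
          ((x :: y :: z :: t).foldl
            (fun d e => if d.contains e = false then d.insert e 1 else d.modify e 0 (· + 1))
            PySem.Dict.empty).getD w 0 = (((x :: y :: z :: t).count w : Nat) : Int) := by
        intro w
        rw [getD_buildLoop]
        simp [PySem.Dict.getD_empty]
      have hle := loop_eq (x :: y :: z :: t) L ((x :: y :: z :: t).length : Int)
        (((x :: y :: z :: t).count L : Nat) : Int) rfl rfl hL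
        (x :: y :: z :: t) [] rfl 0 PySem.Dict.empty
        ((x :: y :: z :: t).foldl
          (fun d e => if d.contains e = false then d.insert e 1 else d.modify e 0 (· + 1))
          PySem.Dict.empty) x 0
        (by intro w; simp [PySem.Dict.getD_empty]) hdr (by intro w hw; simp at hw) (by simp)
      simpa using hle
  · push_neg at hex
    have hlead := leader_none hex
    simp only [solution, solution_alt, hlead]
    cases hcb : (a.foldl bmStep ((none : Option Int), (0 : Int))).1 with
    | none => rfl
    | some c =>
      simp only [count_foldl]
      have hnc := hex c
      unfold IsMaj at hnc
      rw [if_pos (by push_cast; omega)]
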